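-- pv_equiv track=rewrite | github.com/Eorrik/Trajectory-visualization | src/visualization.py | _first_frame_labels_per_second
-- ===== SOURCE A (Python) =====
-- from typing import Any
--
-- def _to_second_level_label(value: Any) -> str:
--     raw = str(value)
--     if "." in raw:
--         raw = raw.split(".", 1)[0]
--     parts = raw.split(":")
--
--     if len(parts) >= 3:
--         # 兼容 HH:MM:SS / MM:SS:mmm 两种格式，统一显示到秒级 MM:SS
--         if parts[-1].isdigit() and len(parts[-1]) == 3:
--             return f"{parts[-3]}:{parts[-2]}"
--         return f"{parts[-2]}:{parts[-1]}"
--     if len(parts) == 2: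
--         return raw
--     return raw
--
-- def _first_frame_labels_per_second(values: list[Any]) -> list[str]:
--     labels: list[str] = []
--     seen_second: set[str] = set()
--     for v in values:
--         sec = _to_second_level_label(v)
--         if sec in seen_second:
--             labels.append("")
--         else:
--             seen_second.add(sec)
--             labels.append(sec)
--     return labels
-- ===== SOURCE B (Python) =====
-- def _to_second_level_label(value) -> str:
--     raw = str(value)
--     if "." in raw:
--         raw = raw.split(".", 1)[0]
--     parts = raw.split(":")
--
--     if len(parts) >= 3:
--         if parts[-1].isdigit() and len(parts[-1]) == 3:
--             return f"{parts[-3]}:{parts[-2]}"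
--         return f"{parts[-2]}:{parts[-1]}"
--     if len(parts) == 2:
--         return raw
--     return raw
--
--
-- def _first_frame_labels_per_second(values) -> list:
--     labels = [_to_second_level_label(v) for v in values]
--     first_index = {}
--     for i, s in enumerate(labels):
--         first_index.setdefault(s, i)
--     return [s if first_index[s] == i else "" for i, s in enumerate(labels)]
-- ===== Notes on version B (the rewrite author's own statement) =====
-- stated objective: alternative
-- what changed: Replaces A's single streaming pass with a mutable seen-set by two shaped passes: precompute all labels, build a first-occurrence index table with setdefault, then emit each label or blank by comparing its position against the table.
import Mathlib
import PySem

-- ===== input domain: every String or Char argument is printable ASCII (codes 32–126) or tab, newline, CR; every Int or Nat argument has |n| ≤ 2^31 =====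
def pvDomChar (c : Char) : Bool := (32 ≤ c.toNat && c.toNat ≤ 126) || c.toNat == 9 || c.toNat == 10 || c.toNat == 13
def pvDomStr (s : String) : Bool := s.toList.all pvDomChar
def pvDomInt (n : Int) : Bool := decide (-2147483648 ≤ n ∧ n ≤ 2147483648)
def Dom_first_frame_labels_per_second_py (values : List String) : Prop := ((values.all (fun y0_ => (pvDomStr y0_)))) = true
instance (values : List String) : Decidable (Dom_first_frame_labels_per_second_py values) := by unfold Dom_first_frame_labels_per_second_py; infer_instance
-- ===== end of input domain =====

-- B replaces A's streaming seen-set with two shaped passes over a precomputed label list: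
-- a first-occurrence index table, then a comparison of each position against that table
-- (objective: alternative decomposition, same asymptotic cost).

-- shared helper: literal port of _to_second_level_label (identical in A and B)
def to_second_level_label (value : String) : String :=
  let raw := value
  let raw := if PySem.Str.isIn "." raw
             then PySem.List.pyGetD ((PySem.Str.splitMax? raw "." 1).getD []) 0 raw
             else raw
  let parts := (PySem.Str.split? raw ":").getD []
  if parts.length ≥ 3 then
    if PySem.Str.strIsdigit (PySem.List.pyGetD parts (-1) "") ∧
       PySem.Str.len (PySem.List.pyGetD parts (-1) "") = 3 then
      PySem.List.pyGetD parts (-3) "" ++ ":" ++ PySem.List.pyGetD parts (-2) ""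
    else
      PySem.List.pyGetD parts (-2) "" ++ ":" ++ PySem.List.pyGetD parts (-1) ""
  else if parts.length = 2 then raw
  else raw

-- ===== PORT A =====
def first_frame_labels_per_second_py (values : List String) : List String :=
  (values.foldl
    (fun (st : List String × PySem.Set String) v =>
      let sec := to_second_level_label v
      if PySem.Set.contains st.2 sec then
        (st.1 ++ [""], st.2)
      else
        (st.1 ++ [sec], PySem.Set.add st.2 sec))
    ([], PySem.Set.empty)).1

-- ===== PORT B =====
def first_frame_labels_per_second_py_alt (values : List String) : List String :=
  let labels := values.map to_second_level_label
  let firstIndex :=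
    (PySem.List.enumerate labels).foldl
      (fun (d : PySem.Dict String Int) p => d.setdefault p.2 p.1) PySem.Dict.empty
  (PySem.List.enumerate labels).map
    (fun p => if PySem.Dict.getD firstIndex p.2 (-1) = p.1 then p.2 else "")

-- ===== PRECONDITION & SPEC =====
def Spec_first_frame_labels_per_second_py (values : List String) (out : List String) : Prop := out = first_frame_labels_per_second_py_alt values
instance (values : List String) (out : List String) : Decidable (Spec_first_frame_labels_per_second_py values out) := by unfold Spec_first_frame_labels_per_second_py; infer_instance

-- ===== CLAIM (what is proved, stated in full; the proofs are below) =====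
def Claim_equal_first_frame_labels_per_second_py : Prop := ∀ (values : List String), Dom_first_frame_labels_per_second_py values → Spec_first_frame_labels_per_second_py values (first_frame_labels_per_second_py values)

-- ===== LEMMAS AND PROOFS =====

-- reference function: position-wise "blank unless first occurrence relative to prev ++ earlier"
def markFirst (prev : List String) : List String → List String
  | [] => []
  | a :: rest => (if a ∈ prev then "" else a) :: markFirst (a :: prev) rest

theorem markFirst_length (prev ls : List String) : (markFirst prev ls).length = ls.length := by
  induction ls generalizing prev with
  | nil => rfl
  | cons a rest ih => simp [markFirst, ih]

theorem markFirst_getElem (prev ls : List String) (i : Nat) (hi : i < ls.length) :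
    (markFirst prev ls)[i]'(by rw [markFirst_length]; exact hi)
      = if ls[i] ∈ prev ∨ ls[i] ∈ ls.take i then "" else ls[i] := by
  induction ls generalizing prev i with
  | nil => simp at hi
  | cons a rest ih =>
    cases i with
    | zero => simp [markFirst]
    | succ j =>
      have hj : j < rest.length := by simpa using hi
      have := ih (a :: prev) j hj
      simp only [markFirst, List.getElem_cons_succ, List.take_succ_cons] at *
      rw [this]
      by_cases h1 : rest[j] = a <;> by_cases h2 : rest[j] ∈ prev <;>
        by_cases h3 : rest[j] ∈ rest.take j <;> simp [h1, h2, h3]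

-- A's fold computes markFirst (seen-set membership = membership in the already-seen labels)
theorem foldA_eq_markFirst (ls : List String) (acc : List String) (seen : PySem.Set String)
    (prev : List String) (hinv : ∀ x, x ∈ seen ↔ x ∈ prev) :
    (ls.foldl
      (fun (st : List String × PySem.Set String) sec =>
        if PySem.Set.contains st.2 sec then (st.1 ++ [""], st.2)
        else (st.1 ++ [sec], PySem.Set.add st.2 sec)) (acc, seen)).1
      = acc ++ markFirst prev ls := by
  induction ls generalizing acc seen prev with
  | nil => simp [markFirst]
  | cons a rest ih =>
    simp only [List.foldl_cons, markFirst]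
    by_cases h : a ∈ prev
    · have hc : PySem.Set.contains seen a = true :=
        (PySem.Set.contains_iff seen a).mpr ((hinv a).mpr h)
      rw [hc]
      simp only [if_true]
      rw [ih (acc ++ [""]) seen (a :: prev)
        (fun x => by
          rw [hinv x]
          constructor
          · exact fun hx => List.mem_cons_of_mem a hx
          · intro hx; rcases List.mem_cons.mp hx with rfl | hx
            · exact h
            · exact hx)]
      simp [h]
    · have hc : PySem.Set.contains seen a = false := by
        rw [← Bool.not_eq_true, PySem.Set.contains_iff]
        exact fun hs => h ((hinv a).mp hs)
      rw [hc]
      simp only [Bool.false_eq_true, if_false]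
      rw [ih (acc ++ [a]) (PySem.Set.add seen a) (a :: prev)
        (fun x => by
          rw [PySem.Set.mem_add, hinv x, List.mem_cons]
          tauto)]
      simp [h]

-- the first-index table: get? after folding setdefault over enumerate = first index (offset s)
theorem getFI (ls : List String) (s : Int) (d : PySem.Dict String Int) (x : String) :
    ((PySem.List.enumerate ls s).foldl
        (fun (d : PySem.Dict String Int) p => d.setdefault p.2 p.1) d).get? x
      = ((d.get? x).orElse (fun _ => (List.idxOf? x ls).map (fun k => s + (k : Int)))) := by
  induction ls generalizing s d with
  | nil =>
    simp only [PySem.List.enumerate_nil, List.foldl_nil, List.idxOf?_nil]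
    cases d.get? x <;> rfl
  | cons a rest ih =>
    rw [PySem.List.enumerate_cons]
    simp only [List.foldl_cons]
    rw [ih]
    by_cases hax : a = x
    · subst hax
      rw [PySem.Dict.get?_setdefault_self]
      have h0 : List.idxOf? a (a :: rest) = some 0 := by simp [List.idxOf?_cons]
      rw [h0]
      cases hga : d.get? a <;> simp
    · rw [PySem.Dict.get?_setdefault_of_ne _ _ (fun h => hax h.symm)]
      have hcons : List.idxOf? x (a :: rest) = (List.idxOf? x rest).map (· + 1) := by
        simp [List.idxOf?_cons, hax]
      rw [hcons]
      cases hg : d.get? x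
      · cases hr : List.idxOf? x rest <;>
          simp [Option.orElse, Int.add_comm, Int.add_left_comm]
      · simp [Option.orElse]

-- B's condition at position i holds exactly when ls[i] is not among the earlier labels
theorem altB_eq_markFirst (ls : List String) :
    (PySem.List.enumerate ls).map
      (fun p => if PySem.Dict.getD
          ((PySem.List.enumerate ls).foldl
            (fun (d : PySem.Dict String Int) p => d.setdefault p.2 p.1) PySem.Dict.empty)
          p.2 (-1) = p.1 then p.2 else "")
      = markFirst [] ls := by
  apply List.ext_getElem
  · simp [PySem.List.length_enumerate, markFirst_length]
  · intro i h1 h2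
    have hi : i < ls.length := by simpa [PySem.List.length_enumerate] using h1
    rw [markFirst_getElem [] ls i hi]
    rw [List.getElem_map, PySem.List.getElem_enumerate]
    set x := ls[i] with hx
    have hget := getFI ls 0 PySem.Dict.empty x
    have hempty : (PySem.Dict.empty : PySem.Dict String Int).get? x = none := rfl
    rw [hempty] at hget
    have hmem : x ∈ ls := by rw [hx]; exact List.getElem_mem hi
    rcases hj : List.idxOf? x ls with _ | j
    · exact absurd (List.idxOf?_eq_none_iff.mp hj) (not_not_intro hmem)
    · obtain ⟨hjlt, hjx, hjmin⟩ := List.idxOf?_eq_some_iff.mp hj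
      rw [hj] at hget
      rw [PySem.Dict.getD_eq_get?_getD, hget]
      simp only [Option.orElse, Option.pure_def, Option.map_some, Option.bind_eq_bind,
        Option.bind_some, Option.getD_some, zero_add, Nat.cast_inj]
      have hcond : (j = i) ↔ ¬ (x ∈ [] ∨ x ∈ ls.take i) := by
        simp only [List.not_mem_nil, false_or]
        constructor
        · rintro rfl hmt
          obtain ⟨k, hk, hkx⟩ := List.mem_take_iff_getElem.mp hmt
          exact hjmin k (Nat.lt_min.mp hk).1 hkx
        · intro hnt
          rcases Nat.lt_trichotomy j i with hlt | heq | hgt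
          · exact absurd (List.mem_take_iff_getElem.mpr ⟨j, Nat.lt_min.mpr ⟨hlt, hjlt⟩, hjx⟩) hnt
          · exact heq
          · exact absurd hx.symm (hjmin i hgt)
      by_cases hc : j = i
      · rw [if_pos (by exact_mod_cast hc), if_neg (hcond.mp hc)]
      · rw [if_neg (by exact_mod_cast hc), if_pos (not_not.mp (fun hn => hc (hcond.mpr hn)))]

-- ===== VERDICT (by name: the statement is the Claim_ definition above) =====
theorem first_frame_labels_per_second_py_spec : Claim_equal_first_frame_labels_per_second_py := by
  intro values _
  show first_frame_labels_per_second_py values = first_frame_labels_per_second_py_alt values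
  unfold first_frame_labels_per_second_py first_frame_labels_per_second_py_alt
  rw [altB_eq_markFirst]
  have h := foldA_eq_markFirst (values.map to_second_level_label) [] PySem.Set.empty []
    (fun x => by simp [PySem.Set.empty])
  rw [List.foldl_map] at h
  exact h
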